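-- pv_equiv track=rewrite | github.com/DaylanCue8/dayawanalisa | backend/archival_manager.py | segment_baybayin_word
-- ===== SOURCE A (Python) =====
-- _CONSONANTS = list("bkdghlmnprstwyr")
--
-- _VOWELS = set("aeiou")
--
-- def segment_baybayin_word(word: str) -> list[str]:
--     """
--     Segment a Tagalog romanised word into Baybayin syllabic units.
--
--     Algorithm
--     ---------
--     Walk through the characters left-to-right:
--       1. Check for the 'ng' digraph followed by a vowel → "nga/ngi/…"
--       2. Check for a consonant followed by a vowel → CV syllable
--       3. A consonant with no following vowel (word-final or before another
--          consonant) → standalone consonant (maps to virama in Baybayin)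
--       4. A standalone vowel → kept as-is
--
--     Parameters
--     ----------
--     word : str
--         Lowercase Tagalog romanised word (e.g. ``"halimbawa"``).
--
--     Returns
--     -------
--     list[str]
--         Syllabic units, e.g. ``["ha", "li", "m", "ba", "wa"]``.
--     """
--     word = word.lower().strip()
--     syllables: list[str] = []
--     i = 0
--     n = len(word)
--
--     while i < n:
--         ch = word[i]
--
--         # Digraph 'ng'
--         if (
--             ch == "n"
--             and i + 1 < n
--             and word[i + 1] == "g"
--         ):
--             if i + 2 < n and word[i + 2] in _VOWELS:
--                 syllables.append("ng" + word[i + 2])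
--                 i += 3
--             else:
--                 # Standalone 'ng' → virama
--                 syllables.append("ng")
--                 i += 2
--             continue
--
--         if ch in _VOWELS:
--             syllables.append(ch)
--             i += 1
--             continue
--
--         if ch in _CONSONANTS:
--             if i + 1 < n and word[i + 1] in _VOWELS:
--                 syllables.append(ch + word[i + 1])
--                 i += 2
--             else:
--                 # Final consonant → virama
--                 syllables.append(ch)
--                 i += 1
--             continue
--
--         # Unknown character (e.g. space, punctuation) — skip
--         i += 1
--
--     return syllables
-- ===== SOURCE B (Python) =====
-- import re
--
-- _SYLLABLE_RE = re.compile(r"ng[aeiou]|ng|[bkdghlmnprstwy][aeiou]?|[aeiou]")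
--
-- def segment_baybayin_word(word: str) -> list[str]:
--     word = word.lower().strip()
--     return [m.group(0) for m in _SYLLABLE_RE.finditer(word)]
-- ===== Notes on version B (the rewrite author's own statement) =====
-- stated objective: idiomatic
-- what changed: Replaced the hand-written index/while scanner with its four guarded branches and manual i-advancement by a single compiled regex of ordered alternatives (ng[aeiou]|ng|[bkdghlmnprstwy][aeiou]?|[aeiou]) driven by re.finditer, whose greedy left-to-right matching and skipping of non-matching positions realises the same segmentation.
import Mathlib
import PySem

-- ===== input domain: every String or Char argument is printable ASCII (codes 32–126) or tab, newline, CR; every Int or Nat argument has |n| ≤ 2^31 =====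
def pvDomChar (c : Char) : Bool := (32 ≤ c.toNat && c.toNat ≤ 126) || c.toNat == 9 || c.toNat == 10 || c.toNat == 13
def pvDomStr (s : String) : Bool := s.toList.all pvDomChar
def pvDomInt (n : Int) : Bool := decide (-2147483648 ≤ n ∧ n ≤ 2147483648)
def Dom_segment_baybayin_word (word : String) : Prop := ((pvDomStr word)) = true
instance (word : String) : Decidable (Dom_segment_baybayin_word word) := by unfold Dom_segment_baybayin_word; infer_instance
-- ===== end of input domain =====

-- B replaces A's hand-written index/while scanner by one ordered-alternative tokenizer
-- (in Python: a single compiled regex with re.finditer); objective: idiomatic/simpler.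

-- ===== PORT A =====
def pvVowels : List Char := ['a', 'e', 'i', 'o', 'u']
def pvConsonants : List Char := ['b','k','d','g','h','l','m','n','p','r','s','t','w','y','r']

def pvLoopA (w : List Char) (n i : Nat) (acc : List String) : List String :=
  if _h : i < n then
    let ch := w.getD i ' '
    if ch = 'n' ∧ i + 1 < n ∧ w.getD (i+1) ' ' = 'g' then
      if i + 2 < n ∧ w.getD (i+2) ' ' ∈ pvVowels then
        pvLoopA w n (i+3) (acc ++ [String.ofList ['n', 'g', w.getD (i+2) ' ']])
      else
        pvLoopA w n (i+2) (acc ++ ["ng"])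
    else if ch ∈ pvVowels then
      pvLoopA w n (i+1) (acc ++ [String.ofList [ch]])
    else if ch ∈ pvConsonants then
      if i + 1 < n ∧ w.getD (i+1) ' ' ∈ pvVowels then
        pvLoopA w n (i+2) (acc ++ [String.ofList [ch, w.getD (i+1) ' ']])
      else
        pvLoopA w n (i+1) (acc ++ [String.ofList [ch]])
    else
      pvLoopA w n (i+1) acc
  else acc
termination_by n - i
decreasing_by all_goals omega

def segment_baybayin_word (word : String) : List String :=
  let w := PySem.Chars.strip (PySem.Chars.lower word.toList)
  pvLoopA w w.length 0 []

-- ===== PORT B =====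
-- B is a regex tokenizer (re.finditer over ng[aeiou]|ng|[bkdghlmnprstwy][aeiou]?|[aeiou]);
-- ported by hand as the left-to-right matcher of exactly these ordered alternatives,
-- advancing one position where no alternative matches (exact: this is finditer's behaviour).
def pvVowelsB : List Char := ['a', 'e', 'i', 'o', 'u']
def pvConsB : List Char := ['b','k','d','g','h','l','m','n','p','r','s','t','w','y']

def pvTokB : List Char → List String
  | [] => []
  | 'n' :: 'g' :: v :: rest =>
      if v ∈ pvVowelsB then String.ofList ['n', 'g', v] :: pvTokB rest
      else "ng" :: pvTokB (v :: rest)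
  | ['n', 'g'] => ["ng"]
  | c :: v :: rest =>
      if c ∈ pvConsB then
        (if v ∈ pvVowelsB then String.ofList [c, v] :: pvTokB rest
         else String.ofList [c] :: pvTokB (v :: rest))
      else if c ∈ pvVowelsB then String.ofList [c] :: pvTokB (v :: rest)
      else pvTokB (v :: rest)
  | [c] =>
      if c ∈ pvConsB ∨ c ∈ pvVowelsB then [String.ofList [c]] else []

def segment_baybayin_word_alt (word : String) : List String :=
  pvTokB (PySem.Chars.strip (PySem.Chars.lower word.toList))

-- ===== PRECONDITION & SPEC =====
def Spec_segment_baybayin_word (word : String) (out : List String) : Prop := out = segment_baybayin_word_alt word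
instance (word : String) (out : List String) : Decidable (Spec_segment_baybayin_word word out) := by unfold Spec_segment_baybayin_word; infer_instance

-- ===== CLAIM (what is proved, stated in full; the proofs are below) =====
def Claim_equal_segment_baybayin_word : Prop := ∀ (word : String), Dom_segment_baybayin_word word → Spec_segment_baybayin_word word (segment_baybayin_word word)

-- ===== LEMMAS AND PROOFS =====

theorem pvConsMemIff (c : Char) : c ∈ pvConsonants ↔ c ∈ pvConsB := by
  simp [pvConsonants, pvConsB]; tauto

theorem pvGetD_drop (w : List Char) (i j : Nat) :
    w.getD (i + j) ' ' = (w.drop i).getD j ' ' := by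
  simp [List.getD_eq_getElem?_getD, List.getElem?_drop]

theorem pvVowMemIff (c : Char) : c ∈ pvVowels ↔ c ∈ pvVowelsB := by
  simp [pvVowels, pvVowelsB]

theorem pvVowNotConsB (c : Char) (h : c ∈ pvVowels) : c ∉ pvConsB := by
  fin_cases h <;> simp [pvConsB]

theorem pvDropSucc (w : List Char) (i : Nat) (c : Char) (l : List Char)
    (h : w.drop i = c :: l) : w.drop (i+1) = l := by
  have h2 : (w.drop i).drop 1 = w.drop (i+1) := List.drop_drop
  rw [h] at h2
  simpa using h2.symm

theorem pvTokB_cons₂ (c v : Char) (rest : List Char) (h : ¬(c = 'n' ∧ v = 'g')) :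
    pvTokB (c :: v :: rest) =
      if c ∈ pvConsB then
        (if v ∈ pvVowelsB then String.ofList [c, v] :: pvTokB rest
         else String.ofList [c] :: pvTokB (v :: rest))
      else if c ∈ pvVowelsB then String.ofList [c] :: pvTokB (v :: rest)
      else pvTokB (v :: rest) := by
  rw [pvTokB.eq_def]
  split
  · simp_all
  · rename_i heq; injection heq with h1 h2; injection h2 with h2 h3
    exact absurd ⟨h1, h2⟩ h
  · rename_i heq; injection heq with h1 h2; injection h2 with h2 h3
    exact absurd ⟨h1, h2⟩ h
  · rename_i heq; injection heq with h1 h2; injection h2 with h2 h3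
    subst h1; subst h2; subst h3; rfl
  · rename_i heq; injection heq with h1 h2; simp at h2

theorem pvMain : ∀ (k : Nat) (l : List Char), l.length ≤ k →
    ∀ (w : List Char) (i : Nat) (acc : List String), w.drop i = l →
    pvLoopA w w.length i acc = acc ++ pvTokB l := by
  intro k
  induction k with
  | zero =>
    intro l hl w i acc hdrop
    have hnil : l = [] := List.length_eq_zero_iff.mp (Nat.le_zero.mp hl)
    subst hnil
    have hlen : (w.drop i).length = w.length - i := List.length_drop
    rw [hdrop] at hlen
    simp at hlen
    rw [pvLoopA]
    have hi : ¬ i < w.length := by omega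
    simp [hi, pvTokB]
  | succ k ih =>
    intro l hl w i acc hdrop
    have hlen : (w.drop i).length = w.length - i := List.length_drop
    rw [hdrop] at hlen
    rcases l with _ | ⟨c, l1⟩
    · simp at hlen
      rw [pvLoopA]
      have hi : ¬ i < w.length := by omega
      simp [hi, pvTokB]
    · simp at hlen
      have hi : i < w.length := by omega
      have h0 : w.getD i ' ' = c := by
        have h := pvGetD_drop w i 0
        rw [hdrop] at h; simpa using h
      have hd1 := pvDropSucc w i c l1 hdrop
      rw [pvLoopA]
      simp only [dif_pos hi, h0]
      rcases l1 with _ | ⟨d, l2⟩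
      · -- last character
        simp only [List.length_nil] at hlen
        have hi1 : ¬ (i + 1 < w.length) := by omega
        rw [if_neg (by rintro ⟨-, h, -⟩; exact hi1 h)]
        have hdnil : w.drop (i+1) = [] := by rw [hd1]
        by_cases hv : c ∈ pvVowels
        · rw [if_pos hv, ih [] (by simp) w (i+1) _ hdnil]
          simp [pvTokB, Or.inr ((pvVowMemIff c).mp hv)]
        · by_cases hk : c ∈ pvConsonants
          · rw [if_neg hv, if_pos hk, if_neg (by rintro ⟨h, -⟩; exact hi1 h),
              ih [] (by simp) w (i+1) _ hdnil]
            simp [pvTokB, Or.inl ((pvConsMemIff c).mp hk)]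
          · rw [if_neg hv, if_neg hk, ih [] (by simp) w (i+1) _ hdnil]
            have hno : ¬ (c ∈ pvConsB ∨ c ∈ pvVowelsB) := by
              rintro (h | h)
              · exact hk ((pvConsMemIff c).mpr h)
              · exact hv ((pvVowMemIff c).mpr h)
            simp [pvTokB, hno]
      · -- at least two characters
        simp only [List.length_cons] at hlen
        have hi1 : i + 1 < w.length := by omega
        have h1 : w.getD (i+1) ' ' = d := by
          have h := pvGetD_drop w i 1
          rw [hdrop] at h; simpa using h
        have hd2 := pvDropSucc w (i+1) d l2 hd1
        by_cases hng : c = 'n' ∧ d = 'g'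
        · obtain ⟨rfl, rfl⟩ := hng
          rw [if_pos ⟨rfl, hi1, h1⟩]
          rcases l2 with _ | ⟨v, l3⟩
          · simp only [List.length_nil] at hlen
            have hi2 : ¬ (i + 2 < w.length) := by omega
            rw [if_neg (by rintro ⟨h, -⟩; exact hi2 h),
              ih [] (by simp) w (i+2) _ (by rw [hd2])]
            simp [pvTokB]
          · simp only [List.length_cons] at hlen
            have hi2 : i + 2 < w.length := by omega
            have h2 : w.getD (i+2) ' ' = v := by
              have h := pvGetD_drop w i 2
              rw [hdrop] at h; simpa using h
            have hd3 := pvDropSucc w (i+2) v l3 hd2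
            by_cases hv : v ∈ pvVowels
            · rw [if_pos ⟨hi2, by rwa [h2]⟩, h2,
                ih l3 (by simp at hl; omega) w (i+3) _ hd3]
              simp [pvTokB, (pvVowMemIff v).mp hv]
            · rw [if_neg (by rintro ⟨-, h⟩; rw [h2] at h; exact hv h),
                ih (v :: l3) (by simp at hl ⊢; omega) w (i+2) _ hd2]
              have hvB : v ∉ pvVowelsB := fun h => hv ((pvVowMemIff v).mpr h)
              simp [pvTokB, hvB]
        · rw [if_neg (by rintro ⟨hc, -, hg⟩; exact hng ⟨hc, by rw [← h1, hg]⟩)]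
          rw [pvTokB_cons₂ c d l2 hng]
          by_cases hv : c ∈ pvVowels
          · rw [if_pos hv, ih (d :: l2) (by simp at hl ⊢; omega) w (i+1) _ hd1]
            simp [pvVowNotConsB c hv, (pvVowMemIff c).mp hv]
          · by_cases hk : c ∈ pvConsonants
            · have hkB : c ∈ pvConsB := (pvConsMemIff c).mp hk
              rw [if_neg hv, if_pos hk]
              by_cases hdv : d ∈ pvVowels
              · rw [if_pos ⟨hi1, by rwa [h1]⟩, h1,
                  ih l2 (by simp at hl; omega) w (i+2) _ hd2]
                simp [hkB, (pvVowMemIff d).mp hdv]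
              · rw [if_neg (by rintro ⟨-, h⟩; rw [h1] at h; exact hdv h),
                  ih (d :: l2) (by simp at hl ⊢; omega) w (i+1) _ hd1]
                have hdvB : d ∉ pvVowelsB := fun h => hdv ((pvVowMemIff d).mpr h)
                simp [hkB, hdvB]
            · have hkB : c ∉ pvConsB := fun h => hk ((pvConsMemIff c).mpr h)
              have hvB : c ∉ pvVowelsB := fun h => hv ((pvVowMemIff c).mpr h)
              rw [if_neg hv, if_neg hk, ih (d :: l2) (by simp at hl ⊢; omega) w (i+1) _ hd1]
              simp [hkB, hvB]

-- ===== VERDICT (by name: the statement is the Claim_ definition above) =====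
theorem segment_baybayin_word_spec : Claim_equal_segment_baybayin_word := by
  intro word _
  unfold Spec_segment_baybayin_word segment_baybayin_word segment_baybayin_word_alt
  exact pvMain _ _ le_rfl _ 0 [] (by simp)
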